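-- pv_equiv track=rewrite | github.com/iakhil/Code-Jam-2021---Qualification-Round | reverseeng.py | secondOp
-- ===== SOURCE A (Python) =====
-- def secondOp(n, p):
--     if p < n - 1:
--         return []
--     l = []
--     k = 0
--     c = 1
--     for i in range(n - 1, 0, -1):
--         c += 1
--
--         if k + c + i - 1 >= p:
--             r = p - k - i + 1
--             l.append(r)
--             for k in range(i - 1):
--                 l.append(1)
--             k = p
--             break
--
--         k += c
--         l.append(c)
--     if k < p:
--         return []
--     return l
-- ===== SOURCE B (Python) =====
-- import math
--
-- def secondOp(n, p):
--     # impossible cost: fewer than n-1 or more than n*(n+1)//2 - 1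
--     if n < 2 or p < n - 1 or p > n * (n + 1) // 2 - 1:
--         return []
--     # smallest t >= 1 with t*(t+1)//2 >= p - (n - 1)
--     q = p - (n - 1)
--     t = (math.isqrt(8 * q + 1) - 1) // 2
--     if t * (t + 1) // 2 < q:
--         t += 1
--     if t < 1:
--         t = 1
--     r = p - t * (t + 1) // 2 + t - n + 2
--     return list(range(2, t + 1)) + [r] + [1] * (n - t - 1)
-- ===== Notes on version B (the rewrite author's own statement) =====
-- stated objective: alternative
-- what changed: Replaces A's scan-and-test loop (incrementing a counter until the remaining budget fits) with a closed-form inversion of the triangular number via math.isqrt to find the break point t directly, then assembles range(2,t+1)+[r]+[1]*(n-t-1) in one step.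
import Mathlib
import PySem

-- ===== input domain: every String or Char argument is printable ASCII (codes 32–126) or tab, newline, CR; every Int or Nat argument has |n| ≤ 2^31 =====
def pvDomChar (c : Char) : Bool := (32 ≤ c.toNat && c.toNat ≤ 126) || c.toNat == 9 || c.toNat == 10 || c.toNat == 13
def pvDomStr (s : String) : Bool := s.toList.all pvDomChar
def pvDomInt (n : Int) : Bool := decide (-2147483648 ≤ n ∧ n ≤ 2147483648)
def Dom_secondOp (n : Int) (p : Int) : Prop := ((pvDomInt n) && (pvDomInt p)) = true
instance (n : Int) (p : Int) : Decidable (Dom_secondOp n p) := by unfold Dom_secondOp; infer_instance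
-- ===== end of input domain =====

-- B replaces A's scan-and-test loop by a closed-form isqrt inversion of the
-- triangular-number cutoff followed by a single list assembly (alternative algorithm).

-- ===== PORT A =====
-- A's for-loop with break: returns (l, k) as they stand after the loop (k = p on break)
def secondOpLoop (p : Int) : List Int → List Int → Int → Int → List Int × Int
  | [], l, k, _ => (l, k)
  | i :: rest, l, k, c =>
    let c' := c + 1
    if p ≤ k + c' + i - 1 then
      let r := p - k - i + 1
      (((PySem.List.pyRange 0 (i - 1) 1).foldl (fun acc _ => acc ++ [1]) (l ++ [r])), p)
    else
      secondOpLoop p rest (l ++ [c']) (k + c') c'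

def secondOp (n : Int) (p : Int) : List Int :=
  if p < n - 1 then []
  else
    let res := secondOpLoop p (PySem.List.pyRange (n - 1) 0 (-1)) [] 0 1
    if res.2 < p then [] else res.1

-- ===== PORT B =====
-- Source B's cutoff computation: smallest t ≥ 1 with t*(t+1)//2 ≥ q, via math.isqrt
def secondOpAltT (q : Int) : Int :=
  let t0 := PySem.Int.floordiv ((Nat.sqrt (8 * q + 1).toNat : Int) - 1) 2
  let t1 := if PySem.Int.floordiv (t0 * (t0 + 1)) 2 < q then t0 + 1 else t0
  if t1 < 1 then 1 else t1

def secondOp_alt (n : Int) (p : Int) : List Int :=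
  if n < 2 ∨ p < n - 1 ∨ p > PySem.Int.floordiv (n * (n + 1)) 2 - 1 then []
  else
    let q := p - (n - 1)
    let t := secondOpAltT q
    let r := p - PySem.Int.floordiv (t * (t + 1)) 2 + t - n + 2
    PySem.List.pyRange 2 (t + 1) 1 ++ [r] ++ List.replicate (n - t - 1).toNat 1

-- ===== PRECONDITION & SPEC =====
def Spec_secondOp (n : Int) (p : Int) (out : List Int) : Prop := out = secondOp_alt n p
instance (n : Int) (p : Int) (out : List Int) : Decidable (Spec_secondOp n p out) := by unfold Spec_secondOp; infer_instance

-- ===== CLAIM (what is proved, stated in full; the proofs are below) =====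
def Claim_equal_secondOp : Prop := ∀ (n : Int) (p : Int), Dom_secondOp n p → Spec_secondOp n p (secondOp n p)

-- ===== LEMMAS AND PROOFS =====

-- triangular number as both ports compute it
def pvT (s : Int) : Int := PySem.Int.floordiv (s * (s + 1)) 2

lemma pvT_two_mul (s : Int) : 2 * pvT s = s * (s + 1) := by
  unfold pvT
  rcases Int.even_mul_succ_self s with ⟨k, hk⟩
  rw [PySem.Int.floordiv_eq_ediv_of_pos (by norm_num)]
  omega

lemma pvT_succ (s : Int) : pvT (s + 1) = pvT s + (s + 1) := by
  have h1 := pvT_two_mul s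
  have h2 := pvT_two_mul (s + 1)
  nlinarith

lemma pvT_mono {s t : Int} (hs : 0 ≤ s) (h : s ≤ t) : pvT s ≤ pvT t := by
  have h1 := pvT_two_mul s
  have h2 := pvT_two_mul t
  nlinarith

lemma pvT_one : pvT 1 = 1 := by decide

lemma fold_ones_aux (xs : List Int) : ∀ L : List Int,
    xs.foldl (fun acc _ => acc ++ [(1 : Int)]) L = L ++ List.replicate xs.length 1 := by
  induction xs with
  | nil => intro L; simp
  | cons x xs ih =>
      intro L
      simp only [List.foldl_cons, ih, List.length_cons, List.replicate_succ]
      simp [List.append_assoc]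

lemma fold_ones (m : Int) (L : List Int) :
    (PySem.List.pyRange 0 m 1).foldl (fun acc _ => acc ++ [(1 : Int)]) L
      = L ++ List.replicate m.toNat 1 := by
  rw [fold_ones_aux, PySem.List.length_pyRange_one]
  congr 2
  omega

-- one non-breaking iteration of A's loop, in invariant form (head i, c = n-i, k = T(n-i)-1)
lemma loop_step (n p i : Int) (h1 : 1 ≤ i) (h2 : i ≤ n - 1)
    (hno : pvT (n - i) < p - n + 1) :
    secondOpLoop p (PySem.List.pyRange i 0 (-1))
        (PySem.List.pyRange 2 (n - i + 1) 1) (pvT (n - i) - 1) (n - i)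
    = secondOpLoop p (PySem.List.pyRange (i - 1) 0 (-1))
        (PySem.List.pyRange 2 (n - (i - 1) + 1) 1) (pvT (n - (i - 1)) - 1) (n - (i - 1)) := by
  rw [PySem.List.pyRange_neg_one_cons (by omega)]
  simp only [secondOpLoop]
  rw [if_neg (by have := pvT_succ (n - i); intro hcon; linarith)]
  have e2 : PySem.List.pyRange 2 (n - i + 1) 1 ++ [n - i + 1]
      = PySem.List.pyRange 2 (n - i + 1 + 1) 1 :=
    (PySem.List.pyRange_one_succ_right (by omega)).symm
  have e3 : pvT (n - i) - 1 + (n - i + 1) = pvT (n - (i - 1)) - 1 := by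
    have := pvT_succ (n - i)
    have e : n - (i - 1) = n - i + 1 := by ring
    rw [e]; linarith
  have e4 : n - (i - 1) = n - i + 1 := by ring
  rw [e2, e3]
  rw [show n - i + 1 + 1 = n - (i - 1) + 1 by ring, ← e4]

-- the breaking iteration of A's loop
lemma loop_break_step (n p i : Int) (h1 : 1 ≤ i)
    (hbr : p - n + 1 ≤ pvT (n - i)) :
    secondOpLoop p (PySem.List.pyRange i 0 (-1))
        (PySem.List.pyRange 2 (n - i + 1) 1) (pvT (n - i) - 1) (n - i)
    = (PySem.List.pyRange 2 (n - i + 1) 1 ++ [p - pvT (n - i) + (n - i) - n + 2]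
         ++ List.replicate (i - 1).toNat 1, p) := by
  rw [PySem.List.pyRange_neg_one_cons (by omega)]
  simp only [secondOpLoop]
  rw [if_pos (by linarith)]
  rw [fold_ones]
  have : p - (pvT (n - i) - 1) - i + 1 = p - pvT (n - i) + (n - i) - n + 2 := by ring
  rw [this, List.append_assoc]

-- running A's loop down to the minimal cutoff t
lemma loopA_run (n p t : Int) (ht : p - n + 1 ≤ pvT t)
    (hmin : ∀ s : Int, 1 ≤ s → s < t → pvT s < p - n + 1)
    (htn : t ≤ n - 1) :
    ∀ j : Nat, ∀ i : Int, i = (j : Int) → n - t ≤ i → i ≤ n - 1 →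
      secondOpLoop p (PySem.List.pyRange i 0 (-1))
          (PySem.List.pyRange 2 (n - i + 1) 1) (pvT (n - i) - 1) (n - i)
      = (PySem.List.pyRange 2 (t + 1) 1 ++ [p - pvT t + t - n + 2]
           ++ List.replicate (n - t - 1).toNat 1, p) := by
  intro j
  induction j with
  | zero =>
      intro i hi hlo hhi
      omega
  | succ j ih =>
      intro i hi hlo hhi
      by_cases hbe : n - i = t
      · rw [loop_break_step n p i (by omega) (by rw [hbe]; exact ht), hbe,
            show (i - 1).toNat = (n - t - 1).toNat by omega]
      · have h1 : (1 : Int) ≤ i := by omega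
        have hlt : n - i < t := by omega
        have hno := hmin (n - i) (by omega) hlt
        rw [loop_step n p i h1 hhi hno]
        exact ih (i - 1) (by omega) (by omega) (by omega)

-- running A's loop to completion when no cutoff fits
lemma loopA_norun (n p : Int)
    (hmin : ∀ s : Int, 1 ≤ s → s ≤ n - 1 → pvT s < p - n + 1) :
    ∀ j : Nat, ∀ i : Int, i = (j : Int) → 0 ≤ i → i ≤ n - 1 →
      secondOpLoop p (PySem.List.pyRange i 0 (-1))
          (PySem.List.pyRange 2 (n - i + 1) 1) (pvT (n - i) - 1) (n - i)
      = (PySem.List.pyRange 2 (n + 1) 1, pvT n - 1) := by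
  intro j
  induction j with
  | zero =>
      intro i hi _ _
      rw [hi]
      rw [PySem.List.pyRange_neg_one_eq_nil (by omega)]
      simp [secondOpLoop]
  | succ j ih =>
      intro i hi h0 hhi
      have h1 : (1 : Int) ≤ i := by omega
      have hno := hmin (n - i) (by omega) (by omega)
      rw [loop_step n p i h1 hhi hno]
      exact ih (i - 1) (by omega) (by omega) (by omega)

-- characterization of Source B's isqrt-based cutoff: smallest t ≥ 1 with T t ≥ q
lemma altT_spec (q : Int) (hq : 0 ≤ q) :
    1 ≤ secondOpAltT q ∧ q ≤ pvT (secondOpAltT q) ∧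
      ∀ s : Int, 1 ≤ s → s < secondOpAltT q → pvT s < q := by
  have hcast : ((8 * q + 1).toNat : Int) = 8 * q + 1 := Int.toNat_of_nonneg (by omega)
  simp only [secondOpAltT]
  set s0 : Nat := Nat.sqrt (8 * q + 1).toNat with hs0
  have hle : ((s0 : Int)) ^ 2 ≤ 8 * q + 1 := by
    rw [← hcast]; exact_mod_cast Nat.sqrt_le' (8 * q + 1).toNat
  have hlt : 8 * q + 1 < ((s0 : Int) + 1) ^ 2 := by
    rw [← hcast]
    have h := Nat.lt_succ_sqrt' (8 * q + 1).toNat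
    exact_mod_cast h
  have hs1 : 1 ≤ (s0 : Int) := by nlinarith
  set t0 : Int := PySem.Int.floordiv ((s0 : Int) - 1) 2 with ht0
  have ht0e : t0 = ((s0 : Int) - 1) / 2 := by
    rw [ht0, PySem.Int.floordiv_eq_ediv_of_pos (by norm_num)]
  have hb : 2 * t0 + 1 ≤ (s0 : Int) ∧ (s0 : Int) ≤ 2 * t0 + 2 ∧ 0 ≤ t0 := by omega
  obtain ⟨hb1, hb2, hb3⟩ := hb
  have hT0 : pvT t0 ≤ q := by
    have := pvT_two_mul t0
    nlinarith
  have hT1 : q < pvT (t0 + 1) := by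
    have := pvT_two_mul (t0 + 1)
    nlinarith
  have hfd : PySem.Int.floordiv (t0 * (t0 + 1)) 2 = pvT t0 := rfl
  rw [hfd]
  by_cases hc : pvT t0 < q
  · -- t1 = t0 + 1, and t0 + 1 ≥ 1 so no clamping
    rw [if_pos hc, if_neg (by omega)]
    refine ⟨by omega, le_of_lt hT1, ?_⟩
    intro s hs1' hs2
    calc pvT s ≤ pvT t0 := pvT_mono (by omega) (by omega)
      _ < q := hc
  · rw [if_neg hc]
    have hT0q : pvT t0 = q := le_antisymm hT0 (by omega)
    by_cases h01 : t0 < 1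
    · -- t0 = 0, q = pvT 0 = 0, clamp to 1
      rw [if_pos h01]
      have ht00 : t0 = 0 := by omega
      have hq0 : q = 0 := by rw [← hT0q, ht00]; decide
      refine ⟨le_refl 1, by rw [pvT_one, hq0]; norm_num, ?_⟩
      intro s hs hs'
      omega
    · rw [if_neg h01]
      refine ⟨by omega, le_of_eq hT0q.symm, ?_⟩
      intro s hs1' hs2
      have : pvT s + s ≤ pvT t0 := by
        have hstep := pvT_succ s
        have : pvT (s + 1) ≤ pvT t0 := pvT_mono (by omega) (by omega)
        linarith [pvT_succ s]
      omega

-- closed form of secondOp_alt off the guard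
lemma alt_eq (n p : Int) (h2 : 2 ≤ n) (hlo : n - 1 ≤ p) (hhi : p ≤ pvT n - 1) :
    secondOp_alt n p =
      PySem.List.pyRange 2 (secondOpAltT (p - (n - 1)) + 1) 1
        ++ [p - pvT (secondOpAltT (p - (n - 1))) + secondOpAltT (p - (n - 1)) - n + 2]
        ++ List.replicate (n - secondOpAltT (p - (n - 1)) - 1).toNat 1 := by
  unfold secondOp_alt
  rw [if_neg (by push Not; exact ⟨by omega, by omega, by unfold pvT at hhi; omega⟩)]
  rfl

-- ===== VERDICT (by name: the statement is the Claim_ definition above) =====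
theorem secondOp_spec : Claim_equal_secondOp := by
  intro n p _
  unfold Spec_secondOp
  by_cases hp : p < n - 1
  · unfold secondOp secondOp_alt
    rw [if_pos hp, if_pos (Or.inr (Or.inl hp))]
  · by_cases hn : n < 2
    · -- the range is empty; A returns [] either way
      unfold secondOp secondOp_alt
      rw [if_neg hp, if_pos (Or.inl hn)]
      rw [PySem.List.pyRange_neg_one_eq_nil (by omega)]
      simp only [secondOpLoop]
      split_ifs with h
      · rfl
      · rfl
    · -- n ≥ 2, p ≥ n - 1
      have hstart :
          secondOpLoop p (PySem.List.pyRange (n - 1) 0 (-1)) [] 0 1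
          = secondOpLoop p (PySem.List.pyRange (n - 1) 0 (-1))
              (PySem.List.pyRange 2 (n - (n - 1) + 1) 1) (pvT (n - (n - 1)) - 1) (n - (n - 1)) := by
        rw [show n - (n - 1) = 1 by ring, pvT_one]
        rw [show (2:Int) = 1 + 1 by norm_num, PySem.List.pyRange_one_eq_nil (by omega)]
        norm_num
      by_cases hhi : p > pvT n - 1
      · -- impossible: cost too large; no break, then k < p
        have hmin : ∀ s : Int, 1 ≤ s → s ≤ n - 1 → pvT s < p - n + 1 := by
          intro s hs1 hs2
          have h1 : pvT s ≤ pvT (n - 1) := pvT_mono (by omega) hs2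
          have h2 := pvT_succ (n - 1)
          rw [show n - 1 + 1 = n by ring] at h2
          omega
        unfold secondOp
        rw [if_neg hp]
        simp only [hstart]
        rw [loopA_norun n p hmin (n - 1).toNat (n - 1) (by omega) (by omega) (le_refl _)]
        rw [if_pos (by omega)]
        unfold secondOp_alt
        exact (if_pos (Or.inr (Or.inr hhi))).trans rfl |>.symm ▸ rfl
      · -- the interesting case: n-1 ≤ p ≤ T n - 1
        set t : Int := secondOpAltT (p - (n - 1)) with htdef
        obtain ⟨ht1, htge, htmin⟩ := altT_spec (p - (n - 1)) (by omega)
        rw [← htdef] at ht1 htge htmin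
        have hq : p - (n - 1) = p - n + 1 := by ring
        rw [hq] at htge htmin
        have htn : t ≤ n - 1 := by
          by_contra hcon
          have := htmin (n - 1) (by omega) (by omega)
          have h2 := pvT_succ (n - 1)
          rw [show n - 1 + 1 = n by ring] at h2
          omega
        unfold secondOp
        rw [if_neg hp]
        simp only [hstart]
        rw [loopA_run n p t htge htmin htn (n - 1).toNat (n - 1) (by omega) (by omega) (le_refl _)]
        rw [if_neg (by omega)]
        rw [alt_eq n p (by omega) (by omega) (by omega), ← htdef]
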